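-- pv_equiv track=rewrite | github.com/williamconvertino/ar-diffusion-2d | eval_pkg/prompt.py | render_grid
-- ===== SOURCE A (Python) =====
-- from typing import Any
--
-- def render_grid(grid: list[list[Any]], title: str = "") -> str:
--     """
--     Render a 9×9 Sudoku grid with box borders, e.g.:
--
--       ┌───────┬───────┬───────┐
--       │ · 7 · │ · · · │ · 4 3 │
--       ...
--       └───────┴───────┴───────┘
--
--     Parameters
--     ----------
--     grid  : 9×9 list-of-lists; None or 0 = empty cell (shown as ·)
--     title : optional label printed above the grid
--     """
--     TOP    = "  ┌───────┬───────┬───────┐"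
--     MID    = "  ├───────┼───────┼───────┤"
--     BOT    = "  └───────┴───────┴───────┘"
--     lines  = []
--
--     if title:
--         lines.append(f"  {title}")
--
--     for r, row in enumerate(grid):
--         if r == 0:
--             lines.append(TOP)
--         elif r % 3 == 0:
--             lines.append(MID)
--
--         cells = []
--         for c, val in enumerate(row):
--             cells.append("·" if (val is None or val == 0) else str(val))
--
--         line = "  │ {0} {1} {2} │ {3} {4} {5} │ {6} {7} {8} │".format(*cells)
--         lines.append(line)
--
--     lines.append(BOT)
--     return "\n".join(lines)
-- ===== SOURCE B (Python) =====
-- def render_grid(grid, title=""):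
--     TOP = "  \u250c\u2500\u2500\u2500\u2500\u2500\u2500\u2500\u252c\u2500\u2500\u2500\u2500\u2500\u2500\u2500\u252c\u2500\u2500\u2500\u2500\u2500\u2500\u2500\u2510"
--     MID = "  \u251c\u2500\u2500\u2500\u2500\u2500\u2500\u2500\u253c\u2500\u2500\u2500\u2500\u2500\u2500\u2500\u253c\u2500\u2500\u2500\u2500\u2500\u2500\u2500\u2524"
--     BOT = "  \u2514\u2500\u2500\u2500\u2500\u2500\u2500\u2500\u2534\u2500\u2500\u2500\u2500\u2500\u2500\u2500\u2534\u2500\u2500\u2500\u2500\u2500\u2500\u2500\u2518"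
--     body = [
--         "  \u2502 {0} {1} {2} \u2502 {3} {4} {5} \u2502 {6} {7} {8} \u2502".format(
--             *["\u00b7" if (v is None or v == 0) else str(v) for v in row]
--         )
--         for row in grid
--     ]
--     bands = [body[i:i + 3] for i in range(0, len(body), 3)]
--     parts = []
--     if title:
--         parts.append(f"  {title}")
--     if bands:
--         parts.append(TOP)
--         parts.append(("\n" + MID + "\n").join("\n".join(band) for band in bands))
--     parts.append(BOT)
--     return "\n".join(parts)
-- ===== Notes on version B (the rewrite author's own statement) =====
-- stated objective: alternative
-- what changed: A interleaves TOP/MID separators by testing r==0 and r%3==0 inside one flat enumerate loop that also builds each cell list by repeated append; B first maps every row to its formatted line, slices the line list into bands of three with range(0,len,3), and assembles the output by joining the bands with the MID rule, so no per-row index arithmetic remains.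
import Mathlib
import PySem

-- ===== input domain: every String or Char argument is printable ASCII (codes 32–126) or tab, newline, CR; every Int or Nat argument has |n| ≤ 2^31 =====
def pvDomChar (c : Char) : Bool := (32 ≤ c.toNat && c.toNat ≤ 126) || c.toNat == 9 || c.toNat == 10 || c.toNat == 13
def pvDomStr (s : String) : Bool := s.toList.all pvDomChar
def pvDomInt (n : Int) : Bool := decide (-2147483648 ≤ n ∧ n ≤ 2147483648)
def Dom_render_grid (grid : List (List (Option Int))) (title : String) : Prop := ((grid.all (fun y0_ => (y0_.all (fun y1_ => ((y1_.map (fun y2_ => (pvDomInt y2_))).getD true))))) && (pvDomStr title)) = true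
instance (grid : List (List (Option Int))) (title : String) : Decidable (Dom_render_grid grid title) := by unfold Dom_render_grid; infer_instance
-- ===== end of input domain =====

-- B re-decomposes A's flat r%3-tested loop into map-rows / chunk-into-bands / join-bands-with-MID;
-- same return value, proved on grids whose rows all have at least 9 cells (elsewhere A raises).

-- ===== PORT A =====
def pvTOP : String := "  ┌───────┬───────┬───────┐"
def pvMID : String := "  ├───────┼───────┼───────┤"
def pvBOT : String := "  └───────┴───────┴───────┘"

-- "·" if (val is None or val == 0) else str(val)
def pvCell (v : Option Int) : String :=
  if v = none ∨ v = some 0 then "·" else PySem.Int.toStr (v.getD 0)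

-- the template "  │ {0} {1} {2} │ {3} {4} {5} │ {6} {7} {8} │".format(*cells); Python raises
-- IndexError when cells has fewer than 9 entries — those inputs are excluded by Pre_, so the
-- getD defaults are never read on admitted inputs
def pvFmtLine (cells : List String) : String :=
  "  │ " ++ cells.getD 0 "" ++ " " ++ cells.getD 1 "" ++ " " ++ cells.getD 2 "" ++ " │ "
  ++ cells.getD 3 "" ++ " " ++ cells.getD 4 "" ++ " " ++ cells.getD 5 "" ++ " │ "
  ++ cells.getD 6 "" ++ " " ++ cells.getD 7 "" ++ " " ++ cells.getD 8 "" ++ " │"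

-- A builds the cells list by appending inside a loop
def pvCellsA (row : List (Option Int)) : List String :=
  row.foldl (fun cs v => cs ++ [pvCell v]) []

def render_grid (grid : List (List (Option Int))) (title : String) : String :=
  let lines : List String := if title ≠ "" then ["  " ++ title] else []
  let lines := (PySem.List.enumerate grid 0).foldl
    (fun ls p =>
      (if p.1 = 0 then ls ++ [pvTOP]
       else if PySem.Int.mod p.1 3 = 0 then ls ++ [pvMID] else ls)
      ++ [pvFmtLine (pvCellsA p.2)])
    lines
  let lines := lines ++ [pvBOT]
  PySem.Str.join "\n" lines

-- ===== PORT B =====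
-- B formats a row in one shot: the template applied to the mapped cell list
def pvFmtRowB (row : List (Option Int)) : String :=
  pvFmtLine (row.map pvCell)

def render_grid_alt (grid : List (List (Option Int))) (title : String) : String :=
  let body := grid.map pvFmtRowB
  let bands := (PySem.List.pyRange 0 (body.length : Int) 3).map
    (fun i => PySem.List.slice body (some i) (some (i + 3)))
  let parts : List String := if title ≠ "" then ["  " ++ title] else []
  let parts := if bands ≠ [] then
      parts ++ [pvTOP, PySem.Str.join ("\n" ++ pvMID ++ "\n") (bands.map (PySem.Str.join "\n"))]
    else parts
  PySem.Str.join "\n" (parts ++ [pvBOT])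

-- ===== PRECONDITION & SPEC =====
-- Pre_ excludes grids containing a row with fewer than 9 cells: there Python A raises IndexError
-- from .format(*cells) (and Python B raises the same way).
def Pre_render_grid (grid : List (List (Option Int))) (title : String) : Prop :=
  ∀ row ∈ grid, 9 ≤ row.length
instance (grid : List (List (Option Int))) (title : String) : Decidable (Pre_render_grid grid title) := by
  unfold Pre_render_grid; infer_instance

def pvWitness_render_grid : List (List (Option Int)) × String :=
  (List.replicate 9 (List.replicate 9 (none : Option Int)), "demo")

def Spec_render_grid (grid : List (List (Option Int))) (title : String) (out : String) : Prop := out = render_grid_alt grid title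
instance (grid : List (List (Option Int))) (title : String) (out : String) : Decidable (Spec_render_grid grid title out) := by unfold Spec_render_grid; infer_instance

-- ===== CLAIM (what is proved, stated in full; the proofs are below) =====
def Claim_equal_render_grid : Prop := ∀ (grid : List (List (Option Int))) (title : String), Dom_render_grid grid title → Pre_render_grid grid title → Spec_render_grid grid title (render_grid grid title)

-- ===== LEMMAS AND PROOFS =====

-- the rows grouped into bands of three (the last band may be shorter)
def chunks3 {α : Type} : List α → List (List α)
  | [] => []
  | [a] => [[a]]
  | [a, b] => [[a, b]]
  | a :: b :: c :: rest => [a, b, c] :: chunks3 rest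

-- the grid lines with pvMID inserted between consecutive bands
def joinMid : List (List String) → List String
  | [] => []
  | [b] => b
  | b :: c :: rest => b ++ pvMID :: joinMid (c :: rest)

theorem chunks3_ne_nil {α : Type} (l : List α) (h : l ≠ []) : chunks3 l ≠ [] := by
  match l with
  | [] => exact absurd rfl h
  | [a] => simp [chunks3]
  | [a, b] => simp [chunks3]
  | a :: b :: c :: rest => simp [chunks3]

theorem mem_chunks3_ne_nil {α : Type} (l : List α) (b : List α) (hb : b ∈ chunks3 l) : b ≠ [] := by
  induction l using chunks3.induct generalizing b with
  | case1 => simp [chunks3] at hb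
  | case2 a => simp [chunks3] at hb; simp [hb]
  | case3 a b' => simp [chunks3] at hb; simp [hb]
  | case4 a b' c rest ih =>
    simp only [chunks3, List.mem_cons] at hb
    rcases hb with h | h
    · simp [h]
    · exact ih _ h

theorem joinMid_ne_nil (C : List (List String)) (hC : C ≠ []) (hb : ∀ b ∈ C, b ≠ []) :
    joinMid C ≠ [] := by
  match C with
  | [] => exact absurd rfl hC
  | [b] => simpa [joinMid] using hb b (by simp)
  | b :: c :: r =>
    have := hb b (by simp)
    simp [joinMid, this]

def joinMidC (mid : List Char) : List (List (List Char)) → List (List Char)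
  | [] => []
  | [b] => b
  | b :: c :: rest => b ++ mid :: joinMidC mid (c :: rest)

theorem map_toList_joinMid (C : List (List String)) :
    (joinMid C).map String.toList = joinMidC pvMID.toList (C.map (List.map String.toList)) := by
  induction C using joinMid.induct with
  | case1 => simp [joinMid, joinMidC]
  | case2 b => simp [joinMid, joinMidC]
  | case3 b c r ih =>
    simp only [joinMid, joinMidC, List.map_cons, List.map_append]
    rw [ih]
    rfl


theorem join_append (sep : List Char) (u v : List (List Char)) (hu : u ≠ []) (hv : v ≠ []) :
    PySem.Chars.join sep (u ++ v) = PySem.Chars.join sep u ++ sep ++ PySem.Chars.join sep v := by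
  induction u with
  | nil => exact absurd rfl hu
  | cons x u' ih =>
    cases u' with
    | nil =>
      cases v with
      | nil => exact absurd rfl hv
      | cons y v' =>
        simp only [List.singleton_append, PySem.Chars.join_cons_cons, PySem.Chars.join_singleton]
    | cons z u'' =>
      have ih' := ih (by simp)
      rw [show (z :: u'') ++ v = z :: (u'' ++ v) by simp] at ih'
      rw [show (x :: z :: u'') ++ v = x :: z :: (u'' ++ v) by simp,
        PySem.Chars.join_cons_cons, ih']
      simp [PySem.Chars.join_cons_cons, List.append_assoc]

theorem join_flatten (sep : List Char) (xs ys zs : List (List Char)) (hy : ys ≠ []) :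
    PySem.Chars.join sep (xs ++ PySem.Chars.join sep ys :: zs)
      = PySem.Chars.join sep (xs ++ ys ++ zs) := by
  have hmid : ∀ zs' : List (List Char), zs' ≠ [] →
      PySem.Chars.join sep (PySem.Chars.join sep ys :: zs')
        = PySem.Chars.join sep (ys ++ zs') := by
    intro zs' hz
    rw [show PySem.Chars.join sep ys :: zs' = [PySem.Chars.join sep ys] ++ zs' by simp,
      join_append sep _ zs' (by simp) hz, PySem.Chars.join_singleton,
      join_append sep ys zs' hy hz]
  by_cases hz : zs = []
  · subst hz
    by_cases hx : xs = []
    · subst hx; simp [PySem.Chars.join_singleton]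
    · rw [show xs ++ ys ++ ([] : List (List Char)) = xs ++ ys by simp,
        join_append sep xs [PySem.Chars.join sep ys] hx (by simp), PySem.Chars.join_singleton,
        join_append sep xs ys hx hy]
  · by_cases hx : xs = []
    · subst hx
      simpa using hmid zs hz
    · have hyz : ys ++ zs ≠ [] := by simp [hy]
      rw [join_append sep xs _ hx (by simp), hmid zs hz,
        show xs ++ ys ++ zs = xs ++ (ys ++ zs) by simp,
        join_append sep xs _ hx hyz]

theorem join_bands (nl mid : List Char) (C : List (List (List Char)))
    (hb : ∀ b ∈ C, b ≠ []) :
    PySem.Chars.join (nl ++ mid ++ nl) (C.map (PySem.Chars.join nl))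
      = PySem.Chars.join nl (joinMidC mid C) := by
  match C with
  | [] => simp [joinMidC, PySem.Chars.join_nil]
  | [b] => simp [joinMidC, PySem.Chars.join_singleton]
  | b :: c :: r =>
    have ih := join_bands nl mid (c :: r) (by intro x hx; exact hb x (List.mem_cons_of_mem _ hx))
    simp only [joinMidC, List.map_cons]
    rw [PySem.Chars.join_cons_cons,
      show PySem.Chars.join nl c :: List.map (PySem.Chars.join nl) r
        = List.map (PySem.Chars.join nl) (c :: r) by simp,
      ih]
    have hbne : b ≠ [] := hb b (by simp)
    have hjne : joinMidC mid (c :: r) ≠ [] := by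
      match r with
      | [] => simpa [joinMidC] using hb c (by simp)
      | d :: r' => simp [joinMidC]
    rw [show b ++ mid :: joinMidC mid (c :: r) = b ++ ([mid] ++ joinMidC mid (c :: r)) by simp,
      join_append nl b _ hbne (by simp),
      join_append nl [mid] _ (by simp) hjne, PySem.Chars.join_singleton]
    simp [List.append_assoc]
termination_by C.length


theorem flatseg {α : Type} (f : α → String) (xs : List α) (s : Int) (hs : 0 < s) (hd : (3:Int) ∣ s) :
    (PySem.List.enumerate xs s).flatMap
      (fun p => (if p.1 = 0 then [pvTOP]
                 else if PySem.Int.mod p.1 3 = 0 then [pvMID] else []) ++ [f p.2])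
      = if xs = [] then [] else pvMID :: joinMid (chunks3 (xs.map f)) := by
  have h0 : s ≠ 0 := by omega
  have hm0 : PySem.Int.mod s 3 = 0 := (PySem.Int.mod_eq_zero_iff_dvd s 3).mpr hd
  have h10 : s + 1 ≠ 0 := by omega
  have h20 : s + 1 + 1 ≠ 0 := by omega
  have hm1 : PySem.Int.mod (s + 1) 3 ≠ 0 := by
    rw [Ne, PySem.Int.mod_eq_zero_iff_dvd]; omega
  have hm2 : PySem.Int.mod (s + 1 + 1) 3 ≠ 0 := by
    rw [Ne, PySem.Int.mod_eq_zero_iff_dvd]; omega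
  have hn1 : ¬ (3:Int) ∣ (s + 1) := by omega
  have hn2 : ¬ (3:Int) ∣ (s + 1 + 1) := by omega
  match xs with
  | [] => simp [PySem.List.enumerate_nil]
  | [b] =>
    simp [PySem.List.enumerate_cons, PySem.List.enumerate_nil, h0, hd, chunks3, joinMid]
  | [b, c] =>
    simp [PySem.List.enumerate_cons, PySem.List.enumerate_nil, h0, h10, hd, hn1, chunks3, joinMid]
  | b :: c :: d :: rest =>
    have hrec := flatseg f rest (s + 3) (by omega) (by omega)
    simp only [PySem.List.enumerate_cons, List.flatMap_cons, h0, hm0, h10, hm1, h20, hm2,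
      if_false, if_true, if_neg, reduceIte]
    rw [show s + 1 + 1 + 1 = s + 3 by ring, hrec]
    by_cases hr : rest = []
    · subst hr
      simp [chunks3, joinMid]
    · simp only [hr, if_false, reduceIte]
      simp only [List.map_cons, chunks3]
      have hcne : chunks3 (rest.map f) ≠ [] := chunks3_ne_nil _ (by simp [hr])
      match hC : chunks3 (rest.map f) with
      | [] => exact absurd hC hcne
      | C1 :: Cr => rw [joinMid]; simp
termination_by xs.length

theorem flatzero {α : Type} (f : α → String) (xs : List α) :
    (PySem.List.enumerate xs 0).flatMap
      (fun p => (if p.1 = 0 then [pvTOP]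
                 else if PySem.Int.mod p.1 3 = 0 then [pvMID] else []) ++ [f p.2])
      = if xs = [] then [] else pvTOP :: joinMid (chunks3 (xs.map f)) := by
  match xs with
  | [] => simp [PySem.List.enumerate_nil]
  | [b] =>
    simp [PySem.List.enumerate_cons, PySem.List.enumerate_nil, chunks3, joinMid,
      show PySem.Int.mod (0+1) 3 ≠ 0 by decide]
  | [b, c] =>
    simp [PySem.List.enumerate_cons, PySem.List.enumerate_nil, chunks3, joinMid,
      show PySem.Int.mod (0+1) 3 ≠ 0 by decide, show PySem.Int.mod (0+1+1) 3 ≠ 0 by decide]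
  | b :: c :: d :: rest =>
    have hrec := flatseg f rest 3 (by omega) (by omega)
    simp only [PySem.List.enumerate_cons, List.flatMap_cons]
    simp only [show PySem.Int.mod (0+1) 3 ≠ 0 by decide, show PySem.Int.mod (0+1+1) 3 ≠ 0 by decide,
      show (0:Int) + 1 ≠ 0 by decide, show (0:Int) + 1 + 1 ≠ 0 by decide, if_false, if_true,
      if_neg, reduceIte]
    rw [show (0:Int) + 1 + 1 + 1 = 3 by ring, hrec]
    by_cases hr : rest = []
    · subst hr; simp [chunks3, joinMid]
    · simp only [hr, if_false, reduceIte]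
      simp only [List.map_cons, chunks3]
      have hcne : chunks3 (rest.map f) ≠ [] := chunks3_ne_nil _ (by simp [hr])
      match hC : chunks3 (rest.map f) with
      | [] => exact absurd hC hcne
      | C1 :: Cr => rw [joinMid]; simp

theorem chunks3_take_drop {α : Type} (l : List α) (h : l ≠ []) :
    chunks3 l = l.take 3 :: chunks3 (l.drop 3) := by
  match l with
  | [] => exact absurd rfl h
  | [a] => simp [chunks3]
  | [a, b] => simp [chunks3]
  | a :: b :: c :: rest => simp [chunks3]

theorem bands_eq_chunks3 (body : List String) :
    (PySem.List.pyRange 0 (body.length : Int) 3).map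
      (fun i => PySem.List.slice body (some i) (some (i + 3))) = chunks3 body := by
  suffices h : ∀ (m : Nat) (l : List String), m = (l.length + 2) / 3 →
      (List.range m).map (fun k => (l.drop (3 * k)).take 3) = chunks3 l by
    rw [PySem.List.pyRange_of_pos 0 (body.length : Int) (by omega)]
    by_cases hb : body = []
    · subst hb; simp [chunks3]
    · have hlen : (0:Int) < body.length := by
        have : body.length ≠ 0 := by simpa using hb
        omega
      rw [if_pos hlen, List.map_map]
      rw [show ((body.length : Int) - 0 + 3 - 1) / 3 = (((body.length + 2) / 3 : Nat) : Int) by omega]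
      rw [Int.toNat_natCast]
      rw [← h ((body.length + 2) / 3) body rfl]
      apply List.map_congr_left
      intro k _
      simp only [Function.comp_apply]
      rw [show (0 : Int) + 3 * (k : Int) = ((3 * k : Nat) : Int) by push_cast; ring]
      rw [show ((3 * k : Nat) : Int) + 3 = ((3 * k : Nat) : Int) + ((3 : Nat) : Int) by norm_num]
      rw [PySem.List.slice_natCast_add]
  intro m
  induction m using Nat.strong_induction_on with
  | _ m ih =>
    intro l hm
    cases l with
    | nil => simp at hm; subst hm; simp [chunks3]
    | cons x xs =>
      have hmpos : 0 < m := by simp at hm; omega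
      obtain ⟨m', rfl⟩ : ∃ m', m = m' + 1 := ⟨m - 1, by omega⟩
      rw [List.range_succ_eq_map, chunks3_take_drop (x :: xs) (by simp)]
      simp only [List.map_cons, List.map_map]
      refine List.cons_eq_cons.mpr ⟨by simp, ?_⟩
      by_cases h3 : xs.length ≤ 2
      · have hm' : m' = 0 := by simp at hm; omega
        subst hm'
        rw [show (x :: xs).drop 3 = [] by rw [List.drop_eq_nil_iff]; simp at h3 ⊢; omega]
        simp [chunks3]
      · have := ih m' (by omega) ((x :: xs).drop 3) (by simp only [List.length_drop, List.length_cons] at hm ⊢; omega)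
        rw [← this]
        apply List.map_congr_left
        intro k _
        simp only [Function.comp_apply, List.drop_drop]
        rw [Nat.succ_eq_add_one, show 3 * (k + 1) = 3 + 3 * k from by ring]


-- the formatted row is the same string in both ports
theorem row_eq (row : List (Option Int)) : pvFmtLine (pvCellsA row) = pvFmtRowB row := by
  rw [pvCellsA, pvFmtRowB, PySem.List.foldl_append_singleton_eq_map]
  simp

-- ===== VERDICT (by name: the statement is the Claim_ definition above) =====
theorem render_grid_spec : Claim_equal_render_grid := by
  intro grid title _hdom _hpre
  unfold Spec_render_grid render_grid render_grid_alt
  dsimp only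
  have hstep : (fun (ls : List String) (p : Int × List (Option Int)) =>
      (if p.1 = 0 then ls ++ [pvTOP]
       else if PySem.Int.mod p.1 3 = 0 then ls ++ [pvMID] else ls)
      ++ [pvFmtLine (pvCellsA p.2)])
      = (fun ls p => ls ++
          ((if p.1 = 0 then [pvTOP]
            else if PySem.Int.mod p.1 3 = 0 then [pvMID] else []) ++ [pvFmtRowB p.2])) := by
    funext ls p
    rw [row_eq]
    split_ifs <;> simp
  rw [hstep, PySem.List.foldl_append_eq_flatMap, flatzero pvFmtRowB grid,
    bands_eq_chunks3 (grid.map pvFmtRowB)]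
  set pre : List String := if title ≠ "" then ["  " ++ title] else [] with hpre_def
  by_cases hg : grid = []
  · subst hg
    simp [chunks3]
  · have hbody : grid.map pvFmtRowB ≠ [] := by simp [hg]
    have hC : chunks3 (grid.map pvFmtRowB) ≠ [] := chunks3_ne_nil _ hbody
    simp only [hg, hC, if_false, if_neg, reduceIte]
    set C := chunks3 (grid.map pvFmtRowB) with hC_def
    apply String.toList_inj.mp
    rw [PySem.Str.toList_join, PySem.Str.toList_join]
    simp only [List.map_append, List.map_cons, List.map_nil, PySem.Str.toList_join, List.map_map]
    have hmap : List.map (String.toList ∘ PySem.Str.join "\n") C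
        = List.map (PySem.Chars.join "\n".toList) (C.map (List.map String.toList)) := by
      simp only [List.map_map]
      apply List.map_congr_left
      intro b _
      simp [PySem.Str.toList_join]
    rw [if_pos hC]
    simp only [List.map_append, List.map_cons, List.map_nil, PySem.Str.toList_join, List.map_map]
    rw [show List.map (String.toList ∘ PySem.Str.join "\n") C
        = List.map (PySem.Chars.join "\n".toList) (C.map (List.map String.toList)) from hmap]
    rw [show ("\n" ++ pvMID ++ "\n").toList = "\n".toList ++ pvMID.toList ++ "\n".toList by simp]
    rw [join_bands "\n".toList pvMID.toList (C.map (List.map String.toList))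
      (by intro b hb
          obtain ⟨b', hb', rfl⟩ := List.mem_map.mp hb
          simp [mem_chunks3_ne_nil _ _ (hC_def ▸ hb')])]
    rw [← map_toList_joinMid]
    have hjne : List.map String.toList (joinMid C) ≠ [] := by
      simp [joinMid_ne_nil C hC (fun b hb => mem_chunks3_ne_nil _ _ (hC_def ▸ hb))]
    rw [show List.map String.toList pre ++
        [pvTOP.toList, PySem.Chars.join "\n".toList (List.map String.toList (joinMid C))] ++ [pvBOT.toList]
        = (List.map String.toList pre ++ [pvTOP.toList]) ++
          PySem.Chars.join "\n".toList (List.map String.toList (joinMid C)) :: [pvBOT.toList] by simp]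
    rw [join_flatten "\n".toList _ _ _ hjne]
    congr 1
    simp
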